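-- pv_equiv track=rewrite | github.com/ics435/numpy-mnburridge | submission.py | not_bibonacci
-- ===== SOURCE A (Python) =====
-- from typing import List
--
-- def bibonacci(n: int) -> List[int]:
--     seq=[]
--     for i in range(0,n):
--         if i==0 or i==1 or i==2:
--             iseq=1
--         else:
--             iseq=seq[i-3]+seq[i-2]+seq[i-1]
--         seq.append(iseq)
--     return(seq)
--     """Write a function that computes the first n+1 elements of the Bibonacci Sequence.
--     This sequence is defined as:
--     B[0] = B[1] = B[2] = 1
--     B[k] = B[k-1] + B[k-2] + B[k-3] for k>2.
--     Args:
--         n = integer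
--     Returns:
--         seq = List of [B[0], B[1], ..., B[n]]
--     """
--     pass # IMPLEMENT ME
--
-- def not_bibonacci(n: int) -> List[int]:
--     yes_bibonacci=bibonacci(n)
--     seq=[]
--     for i in range(0,n):
--         breaker=0
--         for iyes in yes_bibonacci:
--             if i==iyes:
--                 breaker=1
--         if breaker==0:
--             seq.append(i)
--     return(seq)
--     """Use list comprehensions to create a one-line python command that
--     returns a list of the natural numbers in the range [0, n] inclusive
--     that are NOT Bibonacci numbers as computed in the previous function.
--     Args:
--         n = integer
--     Returns:
--         seq = List of integers.
--     """
--     pass # IMPLEMENT ME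
-- ===== SOURCE B (Python) =====
-- def not_bibonacci(n: int):
--     # Walk the Bibonacci values in increasing order and emit the gaps
--     # between consecutive values directly; no membership testing at all.
--     out = []
--     lo = 0  # next candidate not yet emitted or skipped
--     a, b, c = 1, 1, 1
--     while a < n:
--         out.extend(range(lo, a))   # everything strictly below this Bibonacci value
--         lo = a + 1                 # skip the Bibonacci value itself
--         a, b, c = b, c, a + b + c
--     out.extend(range(lo, n))
--     return out
-- ===== Notes on version B (the rewrite author's own statement) =====
-- stated objective: faster
-- what changed: B walks the Bibonacci values in increasing order with a rolling three-value window and emits the complement as the gap ranges between consecutive values, instead of building the full n-element sequence and doing a membership scan for each candidate in range(n).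
import Mathlib
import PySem

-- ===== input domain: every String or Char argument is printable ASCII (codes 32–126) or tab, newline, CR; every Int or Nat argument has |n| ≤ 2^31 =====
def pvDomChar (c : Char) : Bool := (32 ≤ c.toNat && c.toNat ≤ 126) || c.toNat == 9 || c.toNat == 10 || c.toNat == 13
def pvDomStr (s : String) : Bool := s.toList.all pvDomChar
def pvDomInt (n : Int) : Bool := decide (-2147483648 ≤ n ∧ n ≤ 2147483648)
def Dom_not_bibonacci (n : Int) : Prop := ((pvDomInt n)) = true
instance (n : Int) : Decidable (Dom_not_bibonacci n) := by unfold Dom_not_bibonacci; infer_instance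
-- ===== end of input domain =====

-- B walks the Bibonacci values upward with a rolling three-value window and emits the
-- complement directly as the gap ranges between consecutive values, instead of A's full
-- n-element sequence build plus a membership scan for every candidate in range(n).

-- ===== PORT A =====
-- helper bibonacci: builds seq by appending; seq[i-3]/[i-2]/[i-1] are always in range for i ≥ 3,
-- so pyGetD with default 0 is exact (Python never raises here).
def bibonacci (n : Int) : List Int :=
  (PySem.List.pyRange 0 n 1).foldl (fun seq i =>
    let iseq : Int :=
      if i = 0 ∨ i = 1 ∨ i = 2 then 1
      else PySem.List.pyGetD seq (i - 3) 0 + PySem.List.pyGetD seq (i - 2) 0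
            + PySem.List.pyGetD seq (i - 1) 0
    seq ++ [iseq]) []

def not_bibonacci (n : Int) : List Int :=
  let yes_bibonacci := bibonacci n
  (PySem.List.pyRange 0 n 1).foldl (fun seq i =>
    let breaker : Int := yes_bibonacci.foldl (fun b iyes => if i = iyes then 1 else b) 0
    if breaker = 0 then seq ++ [i] else seq) []

-- ===== PORT B =====
-- fuel-bounded transcription of Source B's 'while a < n' loop; the fuel n.toNat + 3 is a
-- termination bound only and is never exhausted while a < n (proved in the lemmas);
-- at fuel 0 the loop exits the same way the 'while' does (final extend).
def gapLoop (n : Int) : Nat → Int → Int → Int → Int → List Int → List Int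
  | 0, _, _, _, lo, out => out ++ PySem.List.pyRange lo n 1
  | fuel + 1, a, b, c, lo, out =>
    if a < n then
      gapLoop n fuel b c (a + b + c) (a + 1) (out ++ PySem.List.pyRange lo a 1)
    else out ++ PySem.List.pyRange lo n 1

def not_bibonacci_alt (n : Int) : List Int :=
  gapLoop n (n.toNat + 3) 1 1 1 0 []

-- ===== PRECONDITION & SPEC =====
def Spec_not_bibonacci (n : Int) (out : List Int) : Prop := out = not_bibonacci_alt n
instance (n : Int) (out : List Int) : Decidable (Spec_not_bibonacci n out) := by unfold Spec_not_bibonacci; infer_instance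

-- ===== CLAIM (what is proved, stated in full; the proofs are below) =====
def Claim_equal_not_bibonacci : Prop := ∀ (n : Int), Dom_not_bibonacci n → Spec_not_bibonacci n (not_bibonacci n)

-- ===== LEMMAS AND PROOFS =====

-- the mathematical Bibonacci sequence, used only by the proofs
def Bseq : Nat → Int
  | 0 => 1
  | 1 => 1
  | 2 => 1
  | k + 3 => Bseq k + Bseq (k + 1) + Bseq (k + 2)

theorem Bseq_pos (k : Nat) : 1 ≤ Bseq k := by
  have h : ∀ m : Nat, 1 ≤ Bseq m ∧ 1 ≤ Bseq (m + 1) ∧ 1 ≤ Bseq (m + 2) := by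
    intro m
    induction m with
    | zero => refine ⟨by decide, by decide, by decide⟩
    | succ m ih =>
      obtain ⟨h1, h2, h3⟩ := ih
      refine ⟨h2, h3, ?_⟩
      show 1 ≤ Bseq (m + 3)
      rw [Bseq]
      omega
  exact (h k).1

theorem Bseq_mono_succ (k : Nat) : Bseq k ≤ Bseq (k + 1) := by
  match k with
  | 0 => decide
  | 1 => decide
  | m + 2 =>
    show Bseq (m + 2) ≤ Bseq (m + 3)
    rw [Bseq]
    have h1 := Bseq_pos m
    have h2 := Bseq_pos (m + 1)
    omega

theorem Bseq_mono {k j : Nat} (h : k ≤ j) : Bseq k ≤ Bseq j := by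
  induction j with
  | zero =>
    have : k = 0 := Nat.le_zero.mp h
    subst this; exact le_refl _
  | succ j ih =>
    rcases Nat.lt_or_ge k (j + 1) with h' | h'
    · exact le_trans (ih (by omega)) (Bseq_mono_succ j)
    · have : k = j + 1 := by omega
      subst this; exact le_refl _

theorem Bseq_ge (k : Nat) : (k : Int) + 3 ≤ Bseq (k + 3) := by
  induction k with
  | zero => decide
  | succ k ih =>
    show ((k : Int) + 1) + 3 ≤ Bseq (k + 4)
    have hrw : Bseq (k + 4) = Bseq (k + 1) + Bseq (k + 2) + Bseq (k + 3) := by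
      show Bseq (k + 1 + 3) = _
      rw [Bseq]
    have h1 := Bseq_pos (k + 1)
    have h2 := Bseq_pos (k + 2)
    omega

-- if k ≥ n + 3 (or n ≤ 0) then Bseq k ≥ n
theorem Bseq_ge_of_big {n : Int} {k : Nat} (h : n + 3 ≤ (k : Int)) : n ≤ Bseq k := by
  by_cases hn : n ≤ 0
  · have h1 := Bseq_pos k; omega
  · have hk3 : 3 ≤ k := by omega
    have : (k : Int) ≤ Bseq k := by
      have := Bseq_ge (k - 3)
      have hcast : ((k - 3 : Nat) : Int) = (k : Int) - 3 := by omega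
      rw [Nat.sub_add_cancel hk3] at this
      omega
    omega

-- ===== A-side characterisation =====

theorem bibonacci_eq (n : Int) : bibonacci n = (List.range n.toNat).map Bseq := by
  unfold bibonacci
  by_cases hn : n ≤ 0
  · rw [PySem.List.pyRange_one_eq_nil hn]
    have : n.toNat = 0 := by omega
    simp [this]
  · have hrw : n = ((n.toNat : Nat) : Int) := by omega
    rw [hrw, PySem.List.pyRange_zero_natCast]
    simp only [Int.toNat_natCast]
    generalize n.toNat = m
    induction m with
    | zero => simp
    | succ m ih =>
      rw [List.range_succ, List.map_append, List.foldl_append, ih, List.map_append,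
        List.map_cons, List.map_nil, List.foldl_cons, List.foldl_nil]
      congr 1
      by_cases hm : m ≤ 2
      · interval_cases m <;> norm_num [Bseq]
      · have hcond : ¬((m : Int) = 0 ∨ (m : Int) = 1 ∨ (m : Int) = 2) := by
          push_neg; refine ⟨by omega, by omega, by omega⟩
        simp only [hcond, if_neg, ite_false]
        obtain ⟨k, rfl⟩ : ∃ k, m = k + 3 := ⟨m - 3, by omega⟩
        have e3 : ((k : Int) + 3) - 3 = ((k : Nat) : Int) := by omega
        have e2 : ((k : Int) + 3) - 2 = (((k + 1 : Nat)) : Int) := by push_cast; omega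
        have e1 : ((k : Int) + 3) - 1 = (((k + 2 : Nat)) : Int) := by push_cast; omega
        have hc : ((k + 3 : Nat) : Int) = (k : Int) + 3 := by push_cast; ring
        rw [hc, e3, e2, e1]
        rw [PySem.List.pyGetD_natCast, PySem.List.pyGetD_natCast, PySem.List.pyGetD_natCast]
        rw [List.getD_eq_getElem?_getD, List.getD_eq_getElem?_getD, List.getD_eq_getElem?_getD]
        simp [List.getElem?_map, List.getElem?_range, Nat.lt_succ_iff, Bseq]

theorem breaker_eq (i : Int) (ys : List Int) (b : Int) :
    ys.foldl (fun b iyes => if i = iyes then 1 else b) b = if i ∈ ys then 1 else b := by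
  induction ys generalizing b with
  | nil => simp
  | cons y ys ih =>
    rw [List.foldl_cons, ih]
    by_cases hy : i = y
    · simp [hy]
    · simp only [List.mem_cons]
      by_cases hm : i ∈ ys <;> simp [hy, hm]

theorem not_bibonacci_eq (n : Int) :
    not_bibonacci n =
      (PySem.List.pyRange 0 n 1).filter (fun i => decide (i ∉ bibonacci n)) := by
  unfold not_bibonacci
  have hbody : ∀ (seq : List Int) (i : Int),
      (let breaker : Int := (bibonacci n).foldl (fun b iyes => if i = iyes then 1 else b) 0
       if breaker = 0 then seq ++ [i] else seq)
      = if decide (i ∉ bibonacci n) = true then seq ++ [i] else seq := by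
    intro seq i
    simp only [breaker_eq]
    by_cases h : i ∈ bibonacci n <;> simp [h]
  calc (PySem.List.pyRange 0 n 1).foldl (fun seq i =>
          let breaker : Int := (bibonacci n).foldl (fun b iyes => if i = iyes then 1 else b) 0
          if breaker = 0 then seq ++ [i] else seq) []
      = (PySem.List.pyRange 0 n 1).foldl
          (fun seq i => if decide (i ∉ bibonacci n) = true then seq ++ [i] else seq) [] := by
        have hfun : (fun (seq : List Int) (i : Int) =>
            let breaker : Int := (bibonacci n).foldl (fun b iyes => if i = iyes then 1 else b) 0
            if breaker = 0 then seq ++ [i] else seq)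
            = fun seq i => if decide (i ∉ bibonacci n) = true then seq ++ [i] else seq := by
          funext seq i; exact hbody seq i
        rw [hfun]
    _ = [] ++ (PySem.List.pyRange 0 n 1).filter (fun i => decide (i ∉ bibonacci n)) := by
        rw [PySem.List.foldl_append_if_eq_filter]
    _ = _ := by simp

-- for 0 ≤ i < n, membership in A's full list agrees with "i is a Bibonacci value"
theorem mem_bib_iff (n i : Int) (h0 : 0 ≤ i) (h1 : i < n) :
    i ∈ (List.range n.toNat).map Bseq ↔ ∃ j : Nat, Bseq j = i := by
  simp only [List.mem_map, List.mem_range]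
  constructor
  · rintro ⟨j, _, hj⟩; exact ⟨j, hj⟩
  · rintro ⟨j, hj⟩
    by_cases hj2 : j ≤ 2
    · have hi1 : i = 1 := by interval_cases j <;> simpa using hj.symm
      refine ⟨0, ?_, hi1 ▸ rfl⟩
      omega
    · refine ⟨j, ?_, hj⟩
      have : (j : Int) ≤ Bseq j := by
        have := Bseq_ge (j - 3)
        rw [Nat.sub_add_cancel (by omega)] at this
        omega
      omega

-- an integer in [lo, m) with m ≤ n is not a Bibonacci number, given the loop invariants
theorem not_bib_of_gap (n lo m i : Int) (k : Nat)
    (hinv : ∀ j, j < k → Bseq j < lo) (hm : m ≤ Bseq k) (hmn : m ≤ n)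
    (h0 : 0 ≤ i) (hlo : lo ≤ i) (him : i < m) : i ∉ bibonacci n := by
  rw [bibonacci_eq, mem_bib_iff n i h0 (by omega)]
  rintro ⟨j, hj⟩
  rcases Nat.lt_or_ge j k with hjk | hjk
  · have := hinv j hjk; omega
  · have := Bseq_mono hjk; omega

-- a gap range passes A's filter unchanged
theorem filter_gap (n lo m : Int) (k : Nat)
    (h0 : 0 ≤ lo) (hinv : ∀ j, j < k → Bseq j < lo) (hm : m ≤ Bseq k) (hmn : m ≤ n) :
    (PySem.List.pyRange lo m 1).filter (fun i => decide (i ∉ bibonacci n))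
      = PySem.List.pyRange lo m 1 := by
  apply List.filter_eq_self.2
  intro i hi
  obtain ⟨hlo, him⟩ := PySem.List.mem_pyRange_one.1 hi
  exact decide_eq_true (not_bib_of_gap n lo m i k hinv hm hmn (by omega) hlo him)

-- ===== B-side characterisation: the gap walk produces exactly A's filtered range =====

theorem gapLoop_eq (n : Int) (f : Nat) :
    ∀ (k : Nat) (lo : Int) (out : List Int),
      n + 3 ≤ (k : Int) + (f : Int) → 0 ≤ lo → lo ≤ Bseq k + 1 →
      (∀ j, j < k → Bseq j < lo) →
      gapLoop n f (Bseq k) (Bseq (k + 1)) (Bseq (k + 2)) lo out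
        = out ++ (PySem.List.pyRange lo n 1).filter (fun i => decide (i ∉ bibonacci n)) := by
  induction f with
  | zero =>
    intro k lo out hf h0 _ hinv
    have hbig : n ≤ Bseq k := Bseq_ge_of_big (by push_cast at hf ⊢; omega)
    simp only [gapLoop]
    rw [filter_gap n lo n k h0 hinv hbig (le_refl n)]
  | succ f ih =>
    intro k lo out hf h0 hub hinv
    simp only [gapLoop]
    by_cases ha : Bseq k < n
    · rw [if_pos ha]
      have hsum : Bseq k + Bseq (k + 1) + Bseq (k + 2) = Bseq (k + 3) := by rw [Bseq]
      rw [hsum]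
      have ih' := ih (k + 1) (Bseq k + 1) (out ++ PySem.List.pyRange lo (Bseq k) 1)
        (by push_cast at hf ⊢; omega)
        (by have := Bseq_pos k; omega)
        (by have := Bseq_mono_succ k; omega)
        (by intro j hj
            rcases Nat.lt_or_ge j k with hj' | hj'
            · have := hinv j hj'; omega
            · have : j = k := by omega
              subst this; omega)
      rw [show k + 1 + 1 = k + 2 from rfl, show k + 1 + 2 = k + 3 from rfl] at ih'
      rw [ih', List.append_assoc]
      congr 1
      by_cases hcase : lo ≤ Bseq k
      · -- split the range at the Bibonacci value Bseq k, which the filter removes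
        rw [PySem.List.pyRange_one_append lo (Bseq k) n hcase (by omega),
          PySem.List.pyRange_one_cons ha, List.filter_append, List.filter_cons,
          filter_gap n lo (Bseq k) k h0 hinv (le_refl _) (by omega)]
        have hbk : Bseq k ∈ bibonacci n := by
          rw [bibonacci_eq, mem_bib_iff n (Bseq k) (by have := Bseq_pos k; omega) ha]
          exact ⟨k, rfl⟩
        simp [hbk]
      · -- lo = Bseq k + 1: the gap range is empty and lo is unchanged
        have hlo : lo = Bseq k + 1 := by omega
        rw [PySem.List.pyRange_one_eq_nil (by omega), hlo]
        simp
    · rw [if_neg ha]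
      push_neg at ha
      rw [filter_gap n lo n k h0 hinv ha (le_refl n)]

-- ===== VERDICT (by name: the statement is the Claim_ definition above) =====
theorem not_bibonacci_spec : Claim_equal_not_bibonacci := by
  intro n _
  unfold Spec_not_bibonacci not_bibonacci_alt
  rw [not_bibonacci_eq]
  have h := gapLoop_eq n (n.toNat + 3) 0 0 []
    (by push_cast; omega) (le_refl 0) (by decide) (by intro j hj; omega)
  simpa [show Bseq 0 = 1 from rfl, show Bseq 1 = 1 from rfl, show Bseq 2 = 1 from rfl] using h.symm
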